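-- pv_equiv track=rewrite | github.com/jloutey-hash/geovac | debug/dirac_native_graph_analysis.py | count_dirac_spinorbitals
-- ===== SOURCE A (Python) =====
-- def count_dirac_spinorbitals(n_max, l_min=0):
--     """Count (n,κ,m_j) Dirac spinor orbitals.
--
--     For each (n, l):
--         κ = -(l+1): j = l+1/2, gives 2j+1 = 2l+2 states
--         κ = +l (l≥1): j = l-1/2, gives 2j+1 = 2l states
--     Total per (n,l):
--         l=0: 2 states (only κ=-1)
--         l≥1: (2l+2) + (2l) = 4l+2 states
--
--     Compare scalar spin-orbitals per (n,l):
--         l=0: 2*(2*0+1) = 2 states (alpha, beta spin of the 1 spatial orbital)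
--         l≥1: 2*(2l+1) = 4l+2 states (alpha, beta spin of each m)
--
--     So for l=0: identical (2 vs 2).
--     For l≥1: identical (4l+2 vs 4l+2).
--     The total counts match!
--     """
--     count = 0
--     for n in range(1, n_max + 1):
--         for l in range(max(l_min, 0), n):
--             # kappa = -(l+1): j = l+1/2, 2j+1 = 2l+2 m_j values
--             count += 2 * l + 2
--             # kappa = +l (only if l >= 1): j = l-1/2, 2j+1 = 2l m_j values
--             if l >= 1:
--                 count += 2 * l
--     return count
-- ===== SOURCE B (Python) =====
-- def count_dirac_spinorbitals(n_max, l_min=0):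
--     # Inner l-loop collapsed: each l contributes 4l+2 states, so
--     # sum_{l=L}^{n-1}(4l+2) = 2n^2 - 2L^2; one pass over n remains.
--     L = max(l_min, 0)
--     count = 0
--     for n in range(L + 1, n_max + 1):
--         count += 2 * n * n - 2 * L * L
--     return count
-- ===== Notes on version B (the rewrite author's own statement) =====
-- stated objective: faster
-- what changed: The inner loop over l is replaced by its closed-form sum 2n^2-2L^2, leaving a single pass over n starting at L+1 (O(n_max) instead of O(n_max^2)).
import Mathlib
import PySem

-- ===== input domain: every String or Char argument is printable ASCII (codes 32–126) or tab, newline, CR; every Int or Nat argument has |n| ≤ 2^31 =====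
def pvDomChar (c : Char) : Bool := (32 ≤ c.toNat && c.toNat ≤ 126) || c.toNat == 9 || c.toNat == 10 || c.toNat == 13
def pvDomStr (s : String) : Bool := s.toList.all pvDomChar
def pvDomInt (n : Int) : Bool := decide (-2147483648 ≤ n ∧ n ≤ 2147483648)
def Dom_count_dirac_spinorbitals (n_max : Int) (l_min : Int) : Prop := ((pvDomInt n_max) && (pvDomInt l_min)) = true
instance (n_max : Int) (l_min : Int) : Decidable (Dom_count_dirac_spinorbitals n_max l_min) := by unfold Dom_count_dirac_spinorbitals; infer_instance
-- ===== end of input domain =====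

-- B replaces A's inner l-loop by its closed-form sum 2n^2-2L^2, leaving one pass over n (faster: one pass instead of two nested loops).

-- ===== PORT A =====
def count_dirac_spinorbitals (n_max : Int) (l_min : Int) : Int :=
  (PySem.List.pyRange 1 (n_max + 1) 1).foldl
    (fun count n =>
      (PySem.List.pyRange (max l_min 0) n 1).foldl
        (fun count l =>
          let count := count + (2 * l + 2)
          if 1 ≤ l then count + 2 * l else count)
        count)
    0

-- ===== PORT B =====
def count_dirac_spinorbitals_alt (n_max : Int) (l_min : Int) : Int :=
  let L := max l_min 0
  (PySem.List.pyRange (L + 1) (n_max + 1) 1).foldl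
    (fun count n => count + (2 * n * n - 2 * L * L)) 0

-- ===== PRECONDITION & SPEC =====
def Spec_count_dirac_spinorbitals (n_max : Int) (l_min : Int) (out : Int) : Prop := out = count_dirac_spinorbitals_alt n_max l_min
instance (n_max : Int) (l_min : Int) (out : Int) : Decidable (Spec_count_dirac_spinorbitals n_max l_min out) := by unfold Spec_count_dirac_spinorbitals; infer_instance

-- ===== CLAIM (what is proved, stated in full; the proofs are below) =====
def Claim_equal_count_dirac_spinorbitals : Prop := ∀ (n_max : Int) (l_min : Int), Dom_count_dirac_spinorbitals n_max l_min → Spec_count_dirac_spinorbitals n_max l_min (count_dirac_spinorbitals n_max l_min)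

-- ===== LEMMAS AND PROOFS =====

-- A's inner loop body, for stating lemmas (definitionally equal to the lambda in port A).
def pvInnerA (count l : Int) : Int :=
  if 1 ≤ l then count + (2 * l + 2) + 2 * l else count + (2 * l + 2)

-- For 0 ≤ l, A's inner body adds exactly 4l+2.
theorem pvInnerA_eq (count l : Int) (hl : 0 ≤ l) : pvInnerA count l = count + (4 * l + 2) := by
  unfold pvInnerA
  split_ifs with h <;> omega

-- The inner loop from L to L+k sums the 4l+2 contributions: closed form 2(L+k)^2 - 2L^2.
theorem pvInner_sum (k : ℕ) : ∀ (L c : Int), 0 ≤ L →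
    (PySem.List.pyRange L (L + (k : Int)) 1).foldl pvInnerA c
      = c + (2 * (L + (k : Int)) * (L + (k : Int)) - 2 * L * L) := by
  induction k with
  | zero =>
      intro L c hL
      rw [Nat.cast_zero, add_zero, PySem.List.pyRange_one_eq_nil (le_refl L)]
      simp
  | succ k ih =>
      intro L c hL
      have h1 : L ≤ L + (k : Int) := by omega
      rw [show ((k + 1 : ℕ) : Int) = (k : Int) + 1 by push_cast; ring,
        show L + ((k : Int) + 1) = (L + (k : Int)) + 1 by ring,
        PySem.List.pyRange_one_succ_right h1, List.foldl_append, ih L c hL]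
      simp only [List.foldl_cons, List.foldl_nil]
      rw [pvInnerA_eq _ _ (by omega : (0:ℤ) ≤ L + (k : Int))]
      ring

-- Inner loop, stated for arbitrary upper bound n (possibly below L).
theorem pvInner_sum' (L n c : Int) (hL : 0 ≤ L) :
    (PySem.List.pyRange L n 1).foldl pvInnerA c
      = c + (if L ≤ n then 2 * n * n - 2 * L * L else 0) := by
  by_cases h : L ≤ n
  · have hk : n = L + ((n - L).toNat : Int) := by omega
    rw [hk, pvInner_sum (n - L).toNat L c hL]
    simp [h]
  · rw [PySem.List.pyRange_one_eq_nil (by omega : n ≤ L)]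
    simp [h]

-- Both outer sums agree, by induction on the (nonnegative) upper bound.
theorem pvOuter (m : ℕ) : ∀ (L : Int), 0 ≤ L →
    (PySem.List.pyRange 1 ((m : Int) + 1) 1).foldl
        (fun count n => (PySem.List.pyRange L n 1).foldl pvInnerA count) 0
      = (PySem.List.pyRange (L + 1) ((m : Int) + 1) 1).foldl
        (fun count n => count + (2 * n * n - 2 * L * L)) 0 := by
  induction m with
  | zero =>
      intro L hL
      rw [Nat.cast_zero, zero_add, PySem.List.pyRange_one_eq_nil (le_refl (1:ℤ)),
        PySem.List.pyRange_one_eq_nil (by omega : (1:ℤ) ≤ L + 1)]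
      rfl
  | succ m ih =>
      intro L hL
      have ih' := ih L hL
      rw [show ((m + 1 : ℕ) : Int) = (m : Int) + 1 by push_cast; ring,
        PySem.List.pyRange_one_succ_right (by omega : (1:ℤ) ≤ (m : Int) + 1),
        List.foldl_append]
      by_cases h : L ≤ (m : Int)
      · rw [PySem.List.pyRange_one_succ_right (by omega : L + 1 ≤ (m : Int) + 1),
          List.foldl_append, ih']
        simp only [List.foldl_cons, List.foldl_nil]
        rw [pvInner_sum' L ((m : Int) + 1) _ hL]
        simp [(by omega : L ≤ (m : Int) + 1)]
      · -- n = m+1 ≤ L: both B ranges up to m+1 and m+2 behave alike; inner adds 0 or the n=L+1 case.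
        rw [PySem.List.pyRange_one_eq_nil (by omega : (m : Int) + 1 ≤ L + 1)] at ih'
        simp only [List.foldl_cons, List.foldl_nil] at *
        rw [ih', pvInner_sum' L ((m : Int) + 1) 0 hL]
        by_cases h2 : L ≤ (m : Int) + 1
        · have hLe : L = (m : Int) + 1 := by omega
          rw [hLe, PySem.List.pyRange_one_eq_nil (le_refl ((m : Int) + 1 + 1))]
          simp
        · rw [PySem.List.pyRange_one_eq_nil (by omega : (m : Int) + 1 + 1 ≤ L + 1)]
          simp [h2]

-- ===== VERDICT (by name: the statement is the Claim_ definition above) =====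
theorem count_dirac_spinorbitals_spec : Claim_equal_count_dirac_spinorbitals := by
  intro n_max l_min _
  unfold Spec_count_dirac_spinorbitals count_dirac_spinorbitals count_dirac_spinorbitals_alt
  show (PySem.List.pyRange 1 (n_max + 1) 1).foldl
      (fun count n => (PySem.List.pyRange (max l_min 0) n 1).foldl pvInnerA count) 0
    = (PySem.List.pyRange (max l_min 0 + 1) (n_max + 1) 1).foldl
      (fun count n => count + (2 * n * n - 2 * max l_min 0 * max l_min 0)) 0
  by_cases h : 0 ≤ n_max
  · rw [show n_max = (n_max.toNat : Int) by omega]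
    exact pvOuter n_max.toNat (max l_min 0) (by omega)
  · rw [PySem.List.pyRange_one_eq_nil (by omega : n_max + 1 ≤ 1),
      PySem.List.pyRange_one_eq_nil (by omega : n_max + 1 ≤ max l_min 0 + 1)]
    rfl
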